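-- pv_equiv track=rewrite | github.com/ankitbrahmbhatt1997/Python-Datastructures-and-ALgorithms | codility/caterpillar/abs_distinct.py | solution
-- ===== SOURCE A (Python) =====
-- def solution(A):
--     distinct = set()
--     for i in A:
--         if i < 0:
--             distinct.add(-i)
--         else:
--             distinct.add(i)
--
--     return len(distinct)
-- ===== SOURCE B (Python) =====
-- def solution(A):
--     vals = sorted(-i if i < 0 else i for i in A)
--     if not vals:
--         return 0
--     count = 1
--     prev = vals[0]
--     for v in vals[1:]:
--         if v != prev:
--             count += 1
--         prev = v
--     return count
-- ===== Notes on version B (the rewrite author's own statement) =====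
-- stated objective: alternative
-- what changed: Replaces the hash-set accumulation with sort-then-scan: sort the absolute values and count positions where adjacent values differ.
import Mathlib
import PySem

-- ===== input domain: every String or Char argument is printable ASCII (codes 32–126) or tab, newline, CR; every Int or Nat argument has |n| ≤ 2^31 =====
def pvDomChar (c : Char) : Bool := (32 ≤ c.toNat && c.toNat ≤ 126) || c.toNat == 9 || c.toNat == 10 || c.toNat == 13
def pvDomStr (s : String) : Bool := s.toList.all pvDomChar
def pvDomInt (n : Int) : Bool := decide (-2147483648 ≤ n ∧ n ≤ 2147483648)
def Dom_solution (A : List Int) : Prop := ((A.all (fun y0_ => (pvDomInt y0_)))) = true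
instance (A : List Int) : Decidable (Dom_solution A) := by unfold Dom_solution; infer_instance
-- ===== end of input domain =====

-- B replaces A's hash-set accumulation by sort-then-scan over absolute values (alternative decomposition, same result).


-- ===== PORT A =====
-- for i in A: distinct.add(-i if i < 0 else i); return len(distinct)
def solution (A : List Int) : Int :=
  let distinct : PySem.Set Int :=
    A.foldl (fun s i => if i < 0 then PySem.Set.add s (-i) else PySem.Set.add s i) PySem.Set.empty
  (PySem.Set.len distinct : Int)

-- ===== PORT B =====
-- vals = sorted(-i if i < 0 else i for i in A); linear scan counting adjacent differences
def solution_alt (A : List Int) : Int :=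
  let vals := PySem.List.sorted (A.map (fun i => if i < 0 then -i else i)) (fun x => x) false
  match vals with
  | [] => 0
  | v :: rest =>
    (rest.foldl (fun (st : Int × Int) x => (if x ≠ st.2 then st.1 + 1 else st.1, x)) (1, v)).1

-- ===== PRECONDITION & SPEC =====
def Spec_solution (A : List Int) (out : Int) : Prop := out = solution_alt A
instance (A : List Int) (out : Int) : Decidable (Spec_solution A out) := by unfold Spec_solution; infer_instance

-- ===== CLAIM (what is proved, stated in full; the proofs are below) =====
def Claim_equal_solution : Prop := ∀ (A : List Int), Dom_solution A → Spec_solution A (solution A)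

-- ===== LEMMAS AND PROOFS =====

-- B's scan over a ≤-sorted list counts its distinct elements (card of its toFinset, minus the head already counted).
theorem scan_count (l : List Int) : ∀ (v c : Int),
    (v :: l).Pairwise (· ≤ ·) →
    (l.foldl (fun (st : Int × Int) x => (if x ≠ st.2 then st.1 + 1 else st.1, x)) (c, v)).1
      = c + (((v :: l).toFinset.card : Int) - 1) := by
  induction l with
  | nil => intro v c _; simp
  | cons x t ih =>
    intro v c hp
    have hvx : v ≤ x := (List.pairwise_cons.1 hp).1 x (by simp)
    have hp' : (x :: t).Pairwise (· ≤ ·) := (List.pairwise_cons.1 hp).2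
    have hxt : ∀ y ∈ t, x ≤ y := fun y hy => (List.pairwise_cons.1 hp').1 y hy
    simp only [List.foldl_cons]
    rw [ih x (if x ≠ v then c + 1 else c) hp']
    by_cases hxv : x = v
    · subst hxv
      simp [List.toFinset_cons]
    · have hvnot : v ∉ (x :: t).toFinset := by
        simp only [List.mem_toFinset, List.mem_cons]
        rintro (h | h)
        · exact hxv h.symm
        · exact hxv (le_antisymm hvx (hxt v h)).symm
      have : ((v :: x :: t).toFinset.card : Int) = ((x :: t).toFinset.card : Int) + 1 := by
        rw [List.toFinset_cons, Finset.card_insert_of_notMem hvnot]; push_cast; ring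
      simp only [if_pos hxv, this]
      ring

theorem sorted_scan :
    solution_alt [] = 0 ∧
    (∀ A : List Int, solution_alt A =
      ((A.map (fun i => if i < 0 then -i else i)).toFinset.card : Int)) := by
  constructor
  · rfl
  · intro A
    unfold solution_alt
    set m := A.map (fun i => if i < 0 then -i else i) with hm
    have hperm : (PySem.List.sorted m (fun x => x) false).Perm m := PySem.List.sorted_perm ..
    have hfin : (PySem.List.sorted m (fun x => x) false).toFinset = m.toFinset :=
      List.toFinset_eq_of_perm _ _ hperm
    have hpw : (PySem.List.sorted m (fun x => x) false).Pairwise (· ≤ ·) := by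
      have := PySem.List.sorted_pairwise m (fun x => x) (κ := Int)
      simpa using this
    cases hs : PySem.List.sorted m (fun x => x) false with
    | nil =>
      have : m.toFinset = ∅ := by rw [← hfin, hs]; simp
      simp [this]
    | cons v rest =>
      rw [hs] at hpw hfin
      simp only []
      rw [scan_count rest v 1 hpw, ← hfin]
      ring

-- A's fold is Set.ofList of the mapped list.
theorem a_fold (A : List Int) :
    A.foldl (fun s i => if i < 0 then PySem.Set.add s (-i) else PySem.Set.add s i) PySem.Set.empty
      = PySem.Set.ofList (A.map (fun i => if i < 0 then -i else i)) := by
  rw [PySem.Set.ofList_eq_foldl, List.foldl_map]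
  congr 1
  funext s i
  by_cases h : i < 0 <;> simp [h]

-- ===== VERDICT (by name: the statement is the Claim_ definition above) =====
theorem solution_spec : Claim_equal_solution := by
  intro A _
  show solution A = solution_alt A
  unfold solution
  rw [sorted_scan.2 A, a_fold]
  set m := A.map (fun i => if i < 0 then -i else i) with hm
  have hnd : (PySem.Set.ofList m).Nodup := PySem.Set.nodup_ofList m
  have hfin : (PySem.Set.ofList m).toFinset = m.toFinset := by
    ext x; simp [List.mem_toFinset, PySem.Set.mem_ofList]
  have hl : (PySem.Set.ofList m).length = m.toFinset.card := by
    rw [← hfin, List.toFinset_card_of_nodup hnd]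
  simp [PySem.Set.len, hl]
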